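-- pv_equiv track=rewrite | github.com/IniasP/aoc-2025 | 10/solution.py | all_sequences
-- ===== SOURCE A (Python) =====
-- def all_sequences(num_options: int, depth: int) -> list[list[int]]:
--     # naive implementation, could use cycle detection or something
--     choices: list[list[int]] = [[]]
--     for _ in range(depth):
--         new_choices = []
--         for choice in range(num_options):
--             for existing_seq in choices:
--                 new_seq = existing_seq.copy()
--                 new_seq.append(choice)
--                 new_choices.append(new_seq)
--         choices = new_choices
--     return choices
-- ===== SOURCE B (Python) =====
-- def all_sequences(num_options: int, depth: int) -> list[list[int]]:
--     # closed-form decoding: output index i encodes the sequence positionally,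
--     # position p varying with weight num_options**p (earliest position fastest).
--     n = depth if depth > 0 else 0
--     m = num_options if num_options > 0 else 0
--     total = m ** n
--     return [[(i // m ** p) % m for p in range(n)] for i in range(total)]
-- ===== Notes on version B (the rewrite author's own statement) =====
-- stated objective: alternative
-- what changed: B replaces the layer-by-layer rebuild (copying every partial sequence num_options times per layer) by a direct positional decoding: it computes total = m**n and decodes each index i into its sequence with (i // m**p) % m, maintaining no accumulator.
import Mathlib
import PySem

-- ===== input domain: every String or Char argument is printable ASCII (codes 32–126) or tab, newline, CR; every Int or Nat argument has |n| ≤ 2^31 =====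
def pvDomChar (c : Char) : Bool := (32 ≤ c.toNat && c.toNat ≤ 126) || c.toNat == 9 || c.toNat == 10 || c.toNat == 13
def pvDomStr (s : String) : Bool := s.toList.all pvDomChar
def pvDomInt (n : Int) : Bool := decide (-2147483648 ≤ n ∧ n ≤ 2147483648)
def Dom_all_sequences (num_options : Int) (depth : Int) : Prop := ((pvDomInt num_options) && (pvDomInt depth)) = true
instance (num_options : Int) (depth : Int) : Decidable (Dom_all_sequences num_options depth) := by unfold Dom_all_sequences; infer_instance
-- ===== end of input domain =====

-- B decodes each output index positionally instead of rebuilding the list layer by layer (alternative decomposition, same output).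

-- ===== PORT A =====
def all_sequences (num_options : Int) (depth : Int) : List (List Int) :=
  (PySem.List.pyRange 0 depth 1).foldl (fun choices _ =>
    (PySem.List.pyRange 0 num_options 1).foldl (fun new_choices choice =>
      choices.foldl (fun acc existing_seq => acc ++ [existing_seq ++ [choice]]) new_choices)
      [])
    [[]]

-- ===== PORT B =====
def all_sequences_alt (num_options : Int) (depth : Int) : List (List Int) :=
  let n : Int := if depth > 0 then depth else 0
  let m : Int := if num_options > 0 then num_options else 0
  let total : Int := m ^ n.toNat
  (PySem.List.pyRange 0 total 1).map (fun i =>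
    (PySem.List.pyRange 0 n 1).map (fun p =>
      PySem.Int.mod (PySem.Int.floordiv i (m ^ p.toNat)) m))

-- ===== PRECONDITION & SPEC =====
def Spec_all_sequences (num_options : Int) (depth : Int) (out : List (List Int)) : Prop := out = all_sequences_alt num_options depth
instance (num_options : Int) (depth : Int) (out : List (List Int)) : Decidable (Spec_all_sequences num_options depth out) := by unfold Spec_all_sequences; infer_instance

-- ===== CLAIM (what is proved, stated in full; the proofs are below) =====
def Claim_equal_all_sequences : Prop := ∀ (num_options : Int) (depth : Int), Dom_all_sequences num_options depth → Spec_all_sequences num_options depth (all_sequences num_options depth)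

-- ===== LEMMAS AND PROOFS =====

-- one layer of A's loop, in clean Nat-indexed form
def pvStep (m : Nat) (cs : List (List Int)) : List (List Int) :=
  (List.range m).flatMap (fun (c : Nat) => cs.map (fun s => s ++ [(c : Int)]))

-- B's value, in clean Nat-indexed form
def pvDecode (m n : Nat) : List (List Int) :=
  (List.range (m ^ n)).map (fun (i : Nat) => (List.range n).map (fun p => ((i / m ^ p % m : Nat) : Int)))

lemma pv_foldl_append (cs : List (List Int)) (c : Int) (nc : List (List Int)) :
    cs.foldl (fun acc s => acc ++ [s ++ [c]]) nc = nc ++ cs.map (fun s => s ++ [c]) := by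
  induction cs generalizing nc with
  | nil => simp
  | cons h t ih => simp [List.foldl, ih]

lemma pv_inner_eq_step (o : Int) (cs : List (List Int)) :
    (PySem.List.pyRange 0 o 1).foldl (fun new_choices choice =>
      cs.foldl (fun acc s => acc ++ [s ++ [choice]]) new_choices) [] = pvStep o.toNat cs := by
  rw [PySem.List.pyRange_one]
  simp only [List.foldl_map, pv_foldl_append]
  rw [PySem.List.foldl_append_eq_flatMap]
  simp [pvStep]

lemma pv_range_mul (m k : Nat) :
    List.range (m * k) = (List.range m).flatMap (fun c => (List.range k).map (fun j => c * k + j)) := by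
  induction m with
  | zero => simp
  | succ m ih =>
      rw [Nat.succ_mul, List.range_add, ih, List.range_succ]
      simp [List.flatMap_append]

lemma pv_decode_succ (m n : Nat) (hm : 0 < m) (c j : Nat) (hj : j < m ^ n) (hc : c < m) :
    (List.range (n + 1)).map (fun p => (((c * m ^ n + j) / m ^ p % m : Nat) : Int))
      = (List.range n).map (fun p => ((j / m ^ p % m : Nat) : Int)) ++ [(c : Int)] := by
  rw [List.range_succ, List.map_append]
  congr 1
  · apply List.map_congr_left
    intro p hp
    rw [List.mem_range] at hp
    congr 1
    have e : m ^ n = m ^ (n - p - 1) * m * m ^ p := by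
      rw [mul_assoc, ← pow_succ', ← pow_add]
      congr 1
      omega
    have h1 : c * m ^ n + j = j + c * (m ^ (n - p - 1) * m) * m ^ p := by
      rw [e]; ring
    rw [h1, Nat.add_mul_div_right _ _ (Nat.pow_pos hm), ← mul_assoc,
      Nat.add_mul_mod_self_right]
  · simp only [List.map_cons, List.map_nil, List.cons.injEq, and_true]
    congr 1
    rw [Nat.add_comm (c * m ^ n) j, Nat.add_mul_div_right _ _ (Nat.pow_pos hm),
      Nat.div_eq_of_lt hj, Nat.zero_add, Nat.mod_eq_of_lt hc]

lemma pv_iter_step (m n : Nat) (hm : 0 < m) :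
    pvStep m (pvDecode m n) = pvDecode m (n + 1) := by
  unfold pvStep pvDecode
  rw [pow_succ, Nat.mul_comm (m ^ n) m, pv_range_mul m (m ^ n), List.map_flatMap]
  refine List.flatMap_congr ?_
  intro c hc
  rw [List.mem_range] at hc
  rw [List.map_map, List.map_map]
  apply List.map_congr_left
  intro j hj
  rw [List.mem_range] at hj
  simpa [Function.comp] using (pv_decode_succ m n hm c j hj hc).symm

lemma pv_foldl_ignore {α β : Type} (f : α → α) (l : List β) (init : α) :
    l.foldl (fun s _ => f s) init = f^[l.length] init := by
  induction l generalizing init with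
  | nil => simp
  | cons h t ih => simp [List.foldl, ih, Function.iterate_succ_apply]

lemma pv_step_zero (cs : List (List Int)) : pvStep 0 cs = [] := by simp [pvStep]

lemma pv_main (m n : Nat) : (pvStep m)^[n] [[]] = pvDecode m n := by
  rcases Nat.eq_zero_or_pos m with hm | hm
  · subst hm
    cases n with
    | zero => simp [pvDecode]
    | succ n =>
        have h0 : ∀ k, (pvStep 0)^[k] ([] : List (List Int)) = [] := by
          intro k; induction k with
          | zero => rfl
          | succ k ih => rw [Function.iterate_succ_apply, pv_step_zero, ih]
        rw [Function.iterate_succ_apply, pv_step_zero, h0, pvDecode]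
        simp [Nat.zero_pow (Nat.succ_pos n)]
  · induction n with
    | zero => simp [pvDecode]
    | succ n ih => rw [Function.iterate_succ_apply', ih, pv_iter_step m n hm]

lemma pv_A_eq (o d : Int) : all_sequences o d = pvDecode o.toNat d.toNat := by
  unfold all_sequences
  simp only [pv_inner_eq_step]
  rw [pv_foldl_ignore, PySem.List.length_pyRange_one, pv_main]
  norm_num

lemma pv_B_eq (o d : Int) : all_sequences_alt o d = pvDecode o.toNat d.toNat := by
  unfold all_sequences_alt pvDecode
  have hn : (if d > 0 then d else 0) = (d.toNat : Int) := by split <;> omega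
  have ho : (if o > 0 then o else 0) = (o.toNat : Int) := by split <;> omega
  simp only [hn, ho, Int.toNat_natCast]
  rw [show ((o.toNat : Int)) ^ d.toNat = ((o.toNat ^ d.toNat : Nat) : Int) by push_cast ; rfl]
  rw [PySem.List.pyRange_zero_natCast, PySem.List.pyRange_zero_natCast, List.map_map]
  apply List.map_congr_left
  intro i _
  simp only [Function.comp, List.map_map]
  apply List.map_congr_left
  intro p _
  simp only [Function.comp_apply, Int.toNat_natCast]
  rw [show ((o.toNat : Int)) ^ p = ((o.toNat ^ p : Nat) : Int) by push_cast; rfl]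
  rw [PySem.Int.floordiv_natCast, PySem.Int.mod_natCast]

-- ===== VERDICT (by name: the statement is the Claim_ definition above) =====
theorem all_sequences_spec : Claim_equal_all_sequences := by
  intro o d _
  unfold Spec_all_sequences
  rw [pv_A_eq, pv_B_eq]
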